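-- pv_equiv track=rewrite | github.com/BH1SCW/Leetcode-1 | HuaHua/1208..py | equalSubstring2
-- ===== SOURCE A (Python) =====
-- def equalSubstring2(s: str, t: str, maxCost: int) -> int:
--     distance = [abs(ord(se) - ord(te)) for (se, te) in zip(s, t)]
--     ans = 0
--     for i in range(len(s)):
--         if len(s) - i + 1 <= ans:
--             return ans
--         T = {}
--         for j in range(i, len(s)):
--             T[j] = T.get(j - 1, 0) + distance[j]
--             if T[j] <= maxCost and j - i + 1 > ans:
--                 ans = j - i + 1
--     return ans
-- ===== SOURCE B (Python) =====
-- def equalSubstring2(s: str, t: str, maxCost: int) -> int: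
--     distance = [abs(ord(se) - ord(te)) for (se, te) in zip(s, t)]
--     left = 0
--     cost = 0
--     for i in range(len(s)):
--         cost += distance[i]
--         if cost > maxCost:
--             cost -= distance[left]
--             left += 1
--     return len(s) - left
-- ===== Notes on version B (the rewrite author's own statement) =====
-- stated objective: faster
-- what changed: Replaced the restart-from-every-start-index double loop with per-start cumulative-cost dicts by a single-pass non-shrinking sliding window maintaining a running cost sum.
import Mathlib
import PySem

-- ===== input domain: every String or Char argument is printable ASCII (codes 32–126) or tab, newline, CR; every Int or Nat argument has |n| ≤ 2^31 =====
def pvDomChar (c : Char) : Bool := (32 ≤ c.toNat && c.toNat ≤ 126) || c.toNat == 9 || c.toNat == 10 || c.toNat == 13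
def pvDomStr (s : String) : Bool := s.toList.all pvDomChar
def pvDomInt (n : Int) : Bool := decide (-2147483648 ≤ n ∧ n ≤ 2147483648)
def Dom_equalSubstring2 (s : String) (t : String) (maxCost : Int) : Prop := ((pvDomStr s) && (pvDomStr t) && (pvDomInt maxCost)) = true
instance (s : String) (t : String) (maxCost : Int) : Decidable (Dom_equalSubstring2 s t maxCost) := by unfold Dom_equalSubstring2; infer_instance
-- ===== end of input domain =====

-- B replaces A's O(n^2) per-start rescans by a one-pass non-shrinking sliding window (faster).


-- ===== PORT A =====
-- distance = [abs(ord(se) - ord(te)) for (se, te) in zip(s, t)]  (identical first line of both Pythons)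
def pvDist (s t : String) : List Int :=
  (s.toList.zip t.toList).map (fun p => |(p.1.toNat : Int) - (p.2.toNat : Int)|)

-- inner loop of A: for j in range(i, len(s)): T[j] = T.get(j-1, 0) + distance[j]; …
-- distance[j] is ported as pyGetD (default 0): under Pre_ every index used is in range
-- (outside Pre_ the Python raises IndexError).
def pvAInner (d : List Int) (C : Int) (i : Int) : List Int → PySem.Dict Int Int → Int → Int
  | [], _, ans => ans
  | j :: js, T, ans =>
    let v := T.getD (j - 1) 0 + PySem.List.pyGetD d j 0
    let T' := T.insert j v
    let ans' := if v ≤ C ∧ j - i + 1 > ans then j - i + 1 else ans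
    pvAInner d C i js T' ans'

-- outer loop of A with the early return
def pvAOuter (d : List Int) (C : Int) (n : Int) : List Int → Int → Int
  | [], ans => ans
  | i :: is, ans =>
    if n - i + 1 ≤ ans then ans
    else pvAOuter d C n is (pvAInner d C i (PySem.List.pyRange i n 1) PySem.Dict.empty ans)

def equalSubstring2 (s : String) (t : String) (maxCost : Int) : Int :=
  let distance := pvDist s t
  let n : Int := PySem.Str.len s
  pvAOuter distance maxCost n (PySem.List.pyRange 0 n 1) 0

-- ===== PORT B =====
-- for i in range(len(s)): cost += distance[i]; if cost > maxCost: cost -= distance[left]; left += 1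
def pvBLoop (d : List Int) (C : Int) : List Int → Int → Int → Int
  | [], left, _ => left
  | i :: is, left, cost =>
    let cost' := cost + PySem.List.pyGetD d i 0
    if cost' > C then pvBLoop d C is (left + 1) (cost' - PySem.List.pyGetD d left 0)
    else pvBLoop d C is left cost'

def equalSubstring2_alt (s : String) (t : String) (maxCost : Int) : Int :=
  let distance := pvDist s t
  let n : Int := PySem.Str.len s
  n - pvBLoop distance maxCost (PySem.List.pyRange 0 n 1) 0 0

-- ===== PRECONDITION & SPEC =====
-- Pre_ excludes only len(s) > len(t), where both Pythons raise IndexError (distance has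
-- zip length min(len s, len t) but is indexed up to len(s)-1).
def Pre_equalSubstring2 (s : String) (t : String) (maxCost : Int) : Prop :=
  s.toList.length ≤ t.toList.length
instance (s : String) (t : String) (maxCost : Int) : Decidable (Pre_equalSubstring2 s t maxCost) := by unfold Pre_equalSubstring2; infer_instance

def pvWitness_equalSubstring2 : String × String × Int := ("abcd", "bcdf", 3)

def Spec_equalSubstring2 (s : String) (t : String) (maxCost : Int) (out : Int) : Prop := out = equalSubstring2_alt s t maxCost
instance (s : String) (t : String) (maxCost : Int) (out : Int) : Decidable (Spec_equalSubstring2 s t maxCost out) := by unfold Spec_equalSubstring2; infer_instance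

-- ===== CLAIM (what is proved, stated in full; the proofs are below) =====
def Claim_equal_equalSubstring2 : Prop := ∀ (s : String) (t : String) (maxCost : Int), Dom_equalSubstring2 s t maxCost → Pre_equalSubstring2 s t maxCost → Spec_equalSubstring2 s t maxCost (equalSubstring2 s t maxCost)

-- ===== LEMMAS AND PROOFS =====

-- prefix-sum of the distance list below an Int index
def pvS (d : List Int) (k : Int) : Int := (d.take k.toNat).sum

theorem pvS_mono (d : List Int) (hd : ∀ x ∈ d, 0 ≤ x) {a b : Int} (hab : a ≤ b) :
    pvS d a ≤ pvS d b := by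
  unfold pvS
  have h : d.take b.toNat = d.take a.toNat ++ ((d.drop a.toNat).take (b.toNat - a.toNat)) := by
    rw [← List.take_add]; congr 1; omega
  rw [h, List.sum_append]
  have h2 : 0 ≤ ((d.drop a.toNat).take (b.toNat - a.toNat)).sum :=
    List.sum_nonneg (fun x hx => hd x (List.mem_of_mem_drop (List.mem_of_mem_take hx)))
  omega

theorem pvS_succ (d : List Int) {j : Int} (h0 : 0 ≤ j) (hj : j < (d.length : Int)) :
    pvS d (j + 1) = pvS d j + PySem.List.pyGetD d j 0 := by
  have hjn : j.toNat < d.length := by omega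
  rw [PySem.List.pyGetD_eq_getElem d 0 h0 hj]
  unfold pvS
  have h1 : (j + 1).toNat = j.toNat + 1 := by omega
  rw [h1, ← List.take_concat_get' _ _ hjn, List.sum_append]
  simp

-- A's inner loop never decreases ans
theorem pvAInner_ge (d : List Int) (C i : Int) :
    ∀ (js : List Int) (T : PySem.Dict Int Int) (ans : Int), ans ≤ pvAInner d C i js T ans := by
  intro js
  induction js with
  | nil => intro T ans; simp [pvAInner]
  | cons j js ih =>
    intro T ans
    simp only [pvAInner]
    refine le_trans ?_ (ih _ _)
    split_ifs with h
    · omega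
    · exact le_refl _

-- A's outer loop never decreases ans
theorem pvAOuter_ge (d : List Int) (C n : Int) :
    ∀ (js : List Int) (ans : Int), ans ≤ pvAOuter d C n js ans := by
  intro js
  induction js with
  | nil => intro ans; simp [pvAOuter]
  | cons j js ih =>
    intro ans
    simp only [pvAOuter]
    split_ifs with h
    · exact le_refl _
    · exact le_trans (pvAInner_ge d C j _ _ _) (ih _)

-- inner loop upper bound (fuel m = number of remaining indices)
theorem pvAInner_ub (d : List Int) (C : Int) (i : Int) (hi : 0 ≤ i) :
    ∀ (m : Nat) (a : Int) (T : PySem.Dict Int Int) (ans goal : Int),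
      ((d.length : Int) - a).toNat = m → i ≤ a → a ≤ (d.length : Int) →
      T.getD (a - 1) 0 = pvS d a - pvS d i →
      ans ≤ goal →
      (∀ r : Int, a < r → r ≤ (d.length : Int) → pvS d r - pvS d i ≤ C → r - i ≤ goal) →
      pvAInner d C i (PySem.List.pyRange a (d.length : Int) 1) T ans ≤ goal := by
  intro m
  induction m with
  | zero =>
    intro a T ans goal hm hia han hT hag hw
    rw [PySem.List.pyRange_one_eq_nil (by omega)]
    simpa [pvAInner] using hag
  | succ m ih =>
    intro a T ans goal hm hia han hT hag hw
    have hlt : a < (d.length : Int) := by omega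
    rw [PySem.List.pyRange_one_cons hlt]
    simp only [pvAInner]
    have hv : T.getD (a - 1) 0 + PySem.List.pyGetD d a 0 = pvS d (a + 1) - pvS d i := by
      rw [hT, pvS_succ d (by omega) hlt]; ring
    apply ih (a + 1) _ _ goal (by omega) (by omega) (by omega)
    · rw [show a + 1 - 1 = a by ring, PySem.Dict.getD_insert, if_pos rfl, hv]
    · split_ifs with h
      · have := hw (a + 1) (by omega) (by omega) (by rw [← hv]; exact h.1)
        omega
      · exact hag
    · intro r hr1 hr2 hr3
      exact hw r (by omega) hr2 hr3

-- inner loop lower bound: every valid window starting at i and ending after a is counted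
theorem pvAInner_lb (d : List Int) (C : Int) (i : Int) (hi : 0 ≤ i) :
    ∀ (m : Nat) (a : Int) (T : PySem.Dict Int Int) (ans : Int),
      ((d.length : Int) - a).toNat = m → i ≤ a → a ≤ (d.length : Int) →
      T.getD (a - 1) 0 = pvS d a - pvS d i →
      ∀ r : Int, a < r → r ≤ (d.length : Int) → pvS d r - pvS d i ≤ C →
      r - i ≤ pvAInner d C i (PySem.List.pyRange a (d.length : Int) 1) T ans := by
  intro m
  induction m with
  | zero =>
    intro a T ans hm hia han hT r hr1 hr2 hr3
    omega
  | succ m ih =>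
    intro a T ans hm hia han hT r hr1 hr2 hr3
    have hlt : a < (d.length : Int) := by omega
    rw [PySem.List.pyRange_one_cons hlt]
    simp only [pvAInner]
    have hv : T.getD (a - 1) 0 + PySem.List.pyGetD d a 0 = pvS d (a + 1) - pvS d i := by
      rw [hT, pvS_succ d (by omega) hlt]; ring
    have hT' : (T.insert a (T.getD (a - 1) 0 + PySem.List.pyGetD d a 0)).getD (a + 1 - 1) 0
        = pvS d (a + 1) - pvS d i := by
      rw [show a + 1 - 1 = a by ring, PySem.Dict.getD_insert, if_pos rfl, hv]
    rcases eq_or_lt_of_le (show a + 1 ≤ r by omega) with hreq | hrgt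
    · -- r = a + 1 : the update (or an already larger ans) covers it
      have hvC : T.getD (a - 1) 0 + PySem.List.pyGetD d a 0 ≤ C := by
        rw [hv, hreq]; exact hr3
      refine le_trans ?_ (pvAInner_ge d C i _ _ _)
      split_ifs with h
      · omega
      · push Not at h
        have := h hvC
        omega
    · exact ih (a + 1) _ _ (by omega) (by omega) (by omega) hT' r hrgt hr2 hr3

theorem pvAOuter_ub (d : List Int) (C : Int) :
    ∀ (m : Nat) (a ans goal : Int), ((d.length : Int) - a).toNat = m → 0 ≤ a →
      ans ≤ goal →
      (∀ l r : Int, a ≤ l → l < r → r ≤ (d.length : Int) → pvS d r - pvS d l ≤ C → r - l ≤ goal) →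
      pvAOuter d C (d.length : Int) (PySem.List.pyRange a (d.length : Int) 1) ans ≤ goal := by
  intro m
  induction m with
  | zero =>
    intro a ans goal hm ha hag hw
    rw [PySem.List.pyRange_one_eq_nil (by omega)]
    simpa [pvAOuter] using hag
  | succ m ih =>
    intro a ans goal hm ha hag hw
    have hlt : a < (d.length : Int) := by omega
    rw [PySem.List.pyRange_one_cons hlt]
    simp only [pvAOuter]
    split_ifs with he
    · exact hag
    · apply ih (a + 1) _ goal (by omega) (by omega)
      · apply pvAInner_ub d C a ha (((d.length : Int) - a).toNat) a PySem.Dict.empty ans goal rfl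
          (le_refl a) (by omega)
        · simp [PySem.Dict.getD_empty]
        · exact hag
        · intro r hr1 hr2 hr3
          exact hw a r (le_refl a) hr1 hr2 hr3
      · intro l r hl hlr hr hval
        exact hw l r (by omega) hlr hr hval

theorem pvAOuter_lb (d : List Int) (C : Int) :
    ∀ (m : Nat) (a ans : Int), ((d.length : Int) - a).toNat = m → 0 ≤ a →
      ∀ l r : Int, a ≤ l → l < r → r ≤ (d.length : Int) → pvS d r - pvS d l ≤ C →
      r - l ≤ pvAOuter d C (d.length : Int) (PySem.List.pyRange a (d.length : Int) 1) ans := by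
  intro m
  induction m with
  | zero =>
    intro a ans hm ha l r hal hlr hr hval
    omega
  | succ m ih =>
    intro a ans hm ha l r hal hlr hr hval
    have hlt : a < (d.length : Int) := by omega
    rw [PySem.List.pyRange_one_cons hlt]
    simp only [pvAOuter]
    split_ifs with he
    · -- early return: every remaining window is shorter than ans
      omega
    · rcases eq_or_lt_of_le hal with rfl | hla
      · -- l = a : the inner scan from a finds this window, and ans never decreases after
        refine le_trans ?_ (pvAOuter_ge d C _ _ _)
        exact pvAInner_lb d C a ha (((d.length : Int) - a).toNat) a PySem.Dict.empty ans rfl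
          (le_refl a) (by omega) (by simp [PySem.Dict.getD_empty]) r hlr hr hval
      · exact ih (a + 1) _ (by omega) (by omega) l r (by omega) hlr hr hval

-- B's sliding-window invariant, pushed through to the end of the loop
theorem pvBLoop_spec (d : List Int) (C : Int) (hd : ∀ x ∈ d, 0 ≤ x) :
    ∀ (m : Nat) (k left cost : Int), ((d.length : Int) - k).toNat = m →
      0 ≤ left → left ≤ k → k ≤ (d.length : Int) →
      cost = pvS d k - pvS d left →
      (∀ l : Int, 0 ≤ l → l < left → C < pvS d k - pvS d l) →
      (k - left = 0 ∨ ∃ l r : Int, 0 ≤ l ∧ l < r ∧ r ≤ k ∧ pvS d r - pvS d l ≤ C ∧ r - l = k - left) →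
      (∀ l r : Int, 0 ≤ l → l ≤ r → r ≤ k → pvS d r - pvS d l ≤ C → r - l ≤ k - left) →
      (0 ≤ pvBLoop d C (PySem.List.pyRange k (d.length : Int) 1) left cost ∧
       pvBLoop d C (PySem.List.pyRange k (d.length : Int) 1) left cost ≤ (d.length : Int)) ∧
      ((d.length : Int) - pvBLoop d C (PySem.List.pyRange k (d.length : Int) 1) left cost = 0 ∨
        ∃ l r : Int, 0 ≤ l ∧ l < r ∧ r ≤ (d.length : Int) ∧ pvS d r - pvS d l ≤ C ∧
          r - l = (d.length : Int) - pvBLoop d C (PySem.List.pyRange k (d.length : Int) 1) left cost) ∧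
      (∀ l r : Int, 0 ≤ l → l ≤ r → r ≤ (d.length : Int) → pvS d r - pvS d l ≤ C →
        r - l ≤ (d.length : Int) - pvBLoop d C (PySem.List.pyRange k (d.length : Int) 1) left cost) := by
  intro m
  induction m with
  | zero =>
    intro k left cost hm h0l hlk hkn hcost H5 H6 H7
    obtain rfl : k = (d.length : Int) := by omega
    rw [PySem.List.pyRange_one_eq_nil (by omega)]
    simp only [pvBLoop]
    exact ⟨⟨by omega, by omega⟩, H6, H7⟩
  | succ m ih =>
    intro k left cost hm h0l hlk hkn hcost H5 H6 H7
    have hlt : k < (d.length : Int) := by omega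
    rw [PySem.List.pyRange_one_cons hlt]
    simp only [pvBLoop]
    have hcost' : cost + PySem.List.pyGetD d k 0 = pvS d (k + 1) - pvS d left := by
      rw [pvS_succ d (by omega) hlt]; omega
    split_ifs with hc
    · -- cost exceeded: advance left
      have hln : left < (d.length : Int) := by omega
      have hLsucc := pvS_succ d h0l hln
      apply ih (k + 1) (left + 1) _ (by clear H6; omega) (by clear H6; omega) (by clear H6; omega) (by clear H6; omega)
      · rw [hLsucc]; omega
      · intro l h0 hl
        rcases lt_or_eq_of_le (show l ≤ left by omega) with h | h
        · have := H5 l h0 h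
          have := pvS_mono d hd (show k ≤ k + 1 by omega)
          omega
        · subst h; omega
      · rcases H6 with h | ⟨l, r, h1, h2, h3, h4, h5⟩
        · exact Or.inl (by omega)
        · exact Or.inr ⟨l, r, h1, h2, by omega, h4, by omega⟩
      · intro l r h0 hlr hrk hval
        rcases lt_or_eq_of_le hrk with h | h
        · have := H7 l r h0 hlr (by omega) hval
          omega
        · -- r = k + 1 : any such window must start strictly after left
          subst h
          have hll : left < l := by
            by_contra hno
            push Not at hno
            have := pvS_mono d hd hno
            omega
          omega
    · -- window stays valid: left unchanged
      apply ih (k + 1) left _ (by clear H6; omega) h0l (by clear H6; omega) (by clear H6; omega) hcost'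
      · intro l h0 hl
        have := H5 l h0 hl
        have := pvS_mono d hd (show k ≤ k + 1 by omega)
        omega
      · exact Or.inr ⟨left, k + 1, h0l, by omega, le_refl _, by omega, by omega⟩
      · intro l r h0 hlr hrk hval
        rcases lt_or_eq_of_le hrk with h | h
        · have := H7 l r h0 hlr (by omega) hval
          omega
        · subst h
          by_cases hll : l < left
          · have := H5 l h0 hll
            have := pvS_mono d hd (show k ≤ k + 1 by omega)
            omega
          · omega

-- core equality over the distance list
theorem pv_core (d : List Int) (C : Int) (hd : ∀ x ∈ d, 0 ≤ x) :
    pvAOuter d C (d.length : Int) (PySem.List.pyRange 0 (d.length : Int) 1) 0 =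
      (d.length : Int) - pvBLoop d C (PySem.List.pyRange 0 (d.length : Int) 1) 0 0 := by
  have hn : (0 : Int) ≤ (d.length : Int) := by positivity
  obtain ⟨⟨hL0, hLn⟩, hach, hub⟩ :=
    pvBLoop_spec d C hd ((d.length : Int) - 0).toNat 0 0 0 rfl (le_refl 0) (le_refl 0) hn
      (by simp [pvS]) (by intro l h0 hl; omega) (Or.inl (by omega))
      (by intro l r h0 hlr hrk hval; omega)
  apply le_antisymm
  · exact pvAOuter_ub d C ((d.length : Int) - 0).toNat 0 0 _ rfl (le_refl 0) (by omega)
      (fun l r h0 hlr hr hval => hub l r h0 (le_of_lt hlr) hr hval)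
  · rcases hach with h | ⟨l, r, h1, h2, h3, h4, h5⟩
    · have := pvAOuter_ge d C (d.length : Int) (PySem.List.pyRange 0 (d.length : Int) 1) 0
      omega
    · have := pvAOuter_lb d C ((d.length : Int) - 0).toNat 0 0 rfl (le_refl 0) l r h1 h2 h3 h4
      omega

-- ===== VERDICT (by name: the statement is the Claim_ definition above) =====
theorem equalSubstring2_spec : Claim_equal_equalSubstring2 := by
  intro s t maxCost hdom hpre
  unfold Spec_equalSubstring2 equalSubstring2 equalSubstring2_alt
  have hlen : ((pvDist s t).length : Int) = PySem.Str.len s := by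
    rw [PySem.Str.len_eq]
    simp only [pvDist, List.length_map, List.length_zip]
    have : s.toList.length ≤ t.toList.length := hpre
    omega
  have hd : ∀ x ∈ pvDist s t, 0 ≤ x := by
    intro x hx
    simp only [pvDist, List.mem_map] at hx
    obtain ⟨p, _, rfl⟩ := hx
    exact abs_nonneg _
  simpa only [hlen] using pv_core (pvDist s t) maxCost hd
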